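-- pv_equiv track=rewrite | github.com/adrianpena03/Practice-Python | 8-Int&Floatpt2.py | RemovePrime
-- ===== SOURCE A (Python) =====
-- def RemovePrime(nums):
--     new_list = []
--     for num in nums:
--         is_prime = True
--         if num < 3:
--             continue
--         else:
--             for i in range(2, int(num**1/2)+1):
--                 if num % i == 0:
--                     is_prime = False
--                     break
--             if not is_prime:
--                 new_list.append(num)
--     return new_list
-- ===== SOURCE B (Python) =====
-- def RemovePrime(nums):
--     # Keep the composite numbers >= 3 (same order/multiplicity as the input).
--     def is_composite(n):
--         d = 2
--         while d * d <= n: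
--             if n % d == 0:
--                 return True
--             d += 1
--         return False
--     return [n for n in nums if n >= 3 and is_composite(n)]
-- ===== Notes on version B (the rewrite author's own statement) =====
-- stated objective: faster
-- what changed: B tests each element for compositeness with a while-loop over divisors d while d*d <= n (sqrt bound, early return) inside a single filter, instead of A's flag-and-break scan of the whole range(2, n//2+1) per element with an append accumulator.
import Mathlib
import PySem

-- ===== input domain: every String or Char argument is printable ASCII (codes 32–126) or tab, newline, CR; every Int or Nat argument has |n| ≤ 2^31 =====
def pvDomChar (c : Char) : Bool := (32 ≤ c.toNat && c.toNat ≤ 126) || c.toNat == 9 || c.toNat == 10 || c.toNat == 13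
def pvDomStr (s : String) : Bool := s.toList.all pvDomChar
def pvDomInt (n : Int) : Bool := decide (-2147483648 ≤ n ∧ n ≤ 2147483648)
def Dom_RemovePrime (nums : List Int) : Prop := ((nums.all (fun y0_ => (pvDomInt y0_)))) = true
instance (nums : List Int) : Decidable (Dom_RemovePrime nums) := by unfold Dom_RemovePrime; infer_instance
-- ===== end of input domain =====

-- B: filter keeping composites >= 3, testing each n with a while-loop over divisors d with d*d <= n
-- (O(sqrt n) per element) instead of A's flagged scan of range(2, n//2+1) (O(n) per element).

-- ===== PORT A =====
-- inner 'for i in range(...): if num % i == 0: is_prime = False; break' (returns the final is_prime)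
def aScan (num : Int) : List Int → Bool
  | [] => true
  | i :: rest => if PySem.Int.mod num i = 0 then false else aScan num rest

-- Python's 'int(num**1/2)' is int(num/2) (num**1 = num, true division); on this branch
-- num ≥ 3 and |num| ≤ 2^31 so float division is exact and truncation = floor = floordiv.
def RemovePrime (nums : List Int) : List Int :=
  nums.foldl (fun new_list num =>
    if num < 3 then new_list
    else
      let is_prime := aScan num (PySem.List.pyRange 2 (PySem.Int.floordiv num 2 + 1) 1)
      if is_prime = false then new_list ++ [num] else new_list) []

-- ===== PORT B =====
-- termination helper for the while-loop port (cited by decreasing_by)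
lemma pv_sq_le_imp_le {n d : Int} (h : d * d ≤ n) : d ≤ n := by nlinarith [sq_nonneg d]

-- 'd = 2; while d*d <= n: if n % d == 0: return True; d += 1; return False'
def isCompositeGo (n d : Int) : Bool :=
  if h : d * d ≤ n then
    if PySem.Int.mod n d = 0 then true else isCompositeGo n (d + 1)
  else false
termination_by (n + 1 - d).toNat
decreasing_by
  have hd := pv_sq_le_imp_le h
  omega

def RemovePrime_alt (nums : List Int) : List Int :=
  nums.filter (fun n => decide (3 ≤ n) && isCompositeGo n 2)

-- ===== PRECONDITION & SPEC =====
def Spec_RemovePrime (nums : List Int) (out : List Int) : Prop := out = RemovePrime_alt nums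
instance (nums : List Int) (out : List Int) : Decidable (Spec_RemovePrime nums out) := by unfold Spec_RemovePrime; infer_instance

-- ===== CLAIM (what is proved, stated in full; the proofs are below) =====
def Claim_equal_RemovePrime : Prop := ∀ (nums : List Int), Dom_RemovePrime nums → Spec_RemovePrime nums (RemovePrime nums)

-- ===== LEMMAS AND PROOFS =====

-- A's inner loop returns false iff some i in the list divides num
lemma aScan_eq_false_iff (num : Int) (l : List Int) :
    aScan num l = false ↔ ∃ i ∈ l, i ∣ num := by
  induction l with
  | nil => simp [aScan]
  | cons i rest ih =>
    simp only [aScan]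
    by_cases h : PySem.Int.mod num i = 0
    · simp [h, (PySem.Int.mod_eq_zero_iff_dvd num i).mp h]
    · simp only [if_neg h, ih]
      constructor
      · rintro ⟨j, hj, hd⟩; exact ⟨j, List.mem_cons_of_mem _ hj, hd⟩
      · rintro ⟨j, hj, hd⟩
        rcases List.mem_cons.mp hj with rfl | hj
        · exact absurd ((PySem.Int.mod_eq_zero_iff_dvd num j).mpr hd) h
        · exact ⟨j, hj, hd⟩

-- B's while-loop finds a divisor e ≥ d with e*e ≤ n, if any
lemma isCompositeGo_eq_true_iff (n : Int) :
    ∀ d, 0 ≤ d → (isCompositeGo n d = true ↔ ∃ e, d ≤ e ∧ e * e ≤ n ∧ e ∣ n) := by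
  intro d hd
  induction d using isCompositeGo.induct n with
  | case1 d hsq hmod =>
    rw [isCompositeGo, dif_pos hsq, if_pos hmod]
    exact ⟨fun _ => ⟨d, le_refl d, hsq, (PySem.Int.mod_eq_zero_iff_dvd n d).mp hmod⟩,
           fun _ => rfl⟩
  | case2 d hsq hmod ih =>
    rw [isCompositeGo, dif_pos hsq, if_neg hmod]
    rw [ih (by omega)]
    constructor
    · rintro ⟨e, he, h1, h2⟩; exact ⟨e, by omega, h1, h2⟩
    · rintro ⟨e, he, h1, h2⟩
      refine ⟨e, ?_, h1, h2⟩
      rcases lt_or_ge d e with h | h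
      · omega
      · have : e = d := le_antisymm h he
        subst this
        exact absurd ((PySem.Int.mod_eq_zero_iff_dvd n e).mpr h2) hmod
  | case3 d hsq =>
    rw [isCompositeGo, dif_neg hsq]
    simp only [Bool.false_eq_true, false_iff]
    rintro ⟨e, he, h1, h2⟩
    have : d * d ≤ e * e := mul_le_mul he he hd (by omega)
    omega

-- A's divisor range [2, n//2] is inhabited iff B's range {e ≥ 2, e*e ≤ n} is (n ≥ 3)
lemma divisor_bridge (n : Int) :
    (∃ i ∈ PySem.List.pyRange 2 (PySem.Int.floordiv n 2 + 1) 1, i ∣ n) ↔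
    (∃ e, 2 ≤ e ∧ e * e ≤ n ∧ e ∣ n) := by
  constructor
  · rintro ⟨i, hi, hd⟩
    rcases PySem.List.mem_pyRange_one.mp hi with ⟨h2, hlt⟩
    have hin : i * 2 ≤ n := (PySem.Int.le_floordiv_iff_mul_le (by omega)).mp (by omega)
    rcases hd with ⟨k, hk⟩
    have h1 : i * 2 ≤ i * k := by rw [← hk]; exact hin
    have hk2 : 2 ≤ k := le_of_mul_le_mul_left h1 (by omega)
    rcases le_or_gt (i * i) n with hii | hii
    · exact ⟨i, h2, hii, ⟨k, hk⟩⟩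
    · have h2' : i * k < i * i := by rw [← hk]; exact hii
      have hki : k < i := lt_of_mul_lt_mul_left h2' (by omega)
      have : k * k < i * k := mul_lt_mul_of_pos_right hki (by omega)
      exact ⟨k, hk2, by omega, ⟨i, by rw [hk, mul_comm]⟩⟩
  · rintro ⟨e, h2, hee, hd⟩
    rcases hd with ⟨k, hk⟩
    have h1 : e * e ≤ e * k := by rw [← hk]; exact hee
    have hek : e ≤ k := le_of_mul_le_mul_left h1 (by omega)
    have h2e : e * 2 ≤ n := by
      have : e * 2 ≤ e * k := mul_le_mul_of_nonneg_left (by omega) (by omega)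
      omega
    have hhalf : e ≤ PySem.Int.floordiv n 2 :=
      (PySem.Int.le_floordiv_iff_mul_le (by omega)).mpr h2e
    exact ⟨e, PySem.List.mem_pyRange_one.mpr ⟨h2, by omega⟩, ⟨k, hk⟩⟩

-- A's loop body is the one-test append shape
lemma body_eq :
    (fun (new_list : List Int) (num : Int) =>
      if num < 3 then new_list
      else
        let is_prime := aScan num (PySem.List.pyRange 2 (PySem.Int.floordiv num 2 + 1) 1)
        if is_prime = false then new_list ++ [num] else new_list)
    = (fun acc num =>
        if (!decide (num < 3) && !aScan num (PySem.List.pyRange 2 (PySem.Int.floordiv num 2 + 1) 1)) = true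
        then acc ++ [num] else acc) := by
  funext acc num
  simp only []
  generalize aScan num (PySem.List.pyRange 2 (PySem.Int.floordiv num 2 + 1) 1) = c
  by_cases h1 : num < 3
  · cases c <;> simp [h1]
  · cases c <;> simp [h1]

-- ===== VERDICT (by name: the statement is the Claim_ definition above) =====
theorem RemovePrime_spec : Claim_equal_RemovePrime := by
  intro nums _
  show RemovePrime nums = RemovePrime_alt nums
  unfold RemovePrime RemovePrime_alt
  rw [body_eq, PySem.List.foldl_append_if_eq_filter, List.nil_append]
  apply List.filter_congr
  intro n _
  apply Bool.eq_iff_iff.mpr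
  simp only [Bool.and_eq_true, Bool.not_eq_true', decide_eq_true_eq, decide_eq_false_iff_not,
    aScan_eq_false_iff, isCompositeGo_eq_true_iff n 2 (by omega)]
  constructor
  · rintro ⟨h3, hdiv⟩
    have h3' : 3 ≤ n := by omega
    exact ⟨h3', (divisor_bridge n).mp hdiv⟩
  · rintro ⟨h3, hdiv⟩
    exact ⟨by omega, (divisor_bridge n).mpr hdiv⟩
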